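-- pv_equiv track=rewrite | github.com/gdahlm/aoc | 2024/python/aoc/day15.py | write_updates
-- ===== SOURCE A (Python) =====
-- CHARS = {
--     "robot": "@",
--     "box": "O",
--     "wall": "#",
--     "empty": ".",
-- }
--
-- def tuple_sum(a: tuple, b: tuple):
--     return tuple(sum(x) for x in zip(a, b))
--
-- def write_updates(board, location, move_mask, new_slice, index=0, res=None):
--     """write the new slice to the board"""
--     rows, cols = len(board), len(board[0])
--     if len(new_slice) == 0:
--         return board
--     if index > 0:
--         next_loc = tuple_sum(location, move_mask)
--     else:
--         next_loc = location
--
--     new_row, new_col = next_loc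
--     new_char = new_slice.pop(0)
--
--     if rows >= new_row < 0 or cols >= new_col < 0:
--         return res
--
--     board[new_row][new_col] = new_char
--
--     if new_char == CHARS["wall"]:
--         return res
--
--     board = write_updates(board, (new_row, new_col), move_mask, new_slice, index + 1)
--
--     return board
-- ===== SOURCE B (Python) =====
-- # Iterative rewrite: a while loop over the slice keeping the current cell,
-- # writing until a wall (inclusive) or a negative coordinate; returns `res`
-- # whenever the walk stops early, `board` when the whole slice was written.
-- # Mutates board and new_slice in place (pop(0)) just like a recursive writer would.
-- def write_updates(board, location, move_mask, new_slice, index=0, res=None):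
--     """write the new slice to the board"""
--     row, col = location
--     while new_slice:
--         if index > 0:
--             row += move_mask[0]
--             col += move_mask[1]
--         new_char = new_slice.pop(0)
--         if row < 0 or col < 0:
--             return res
--         board[row][col] = new_char
--         if new_char == "#":
--             return res
--         index += 1
--     return board
-- ===== Notes on version B (the rewrite author's own statement) =====
-- stated objective: idiomatic
-- what changed: Replaces the recursion with an explicit while loop that keeps the current row/col and consistently propagates res on every early stop, instead of re-calling itself with res reset to the default.
-- intended difference: On inputs where res is not None and the walk stops (wall or negative coordinate) at step 1 or later, A returns None because its recursive call drops res back to the default, while B returns the given res, which is the intended failure value (A itself returns res for a stop at step 0). — e.g. on write_updates([[".", "."]], (0, 0), (0, 1), ["O", "#"], 0, some [["X"]]): A returns none, B returns some [["X"]]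
import Mathlib
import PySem

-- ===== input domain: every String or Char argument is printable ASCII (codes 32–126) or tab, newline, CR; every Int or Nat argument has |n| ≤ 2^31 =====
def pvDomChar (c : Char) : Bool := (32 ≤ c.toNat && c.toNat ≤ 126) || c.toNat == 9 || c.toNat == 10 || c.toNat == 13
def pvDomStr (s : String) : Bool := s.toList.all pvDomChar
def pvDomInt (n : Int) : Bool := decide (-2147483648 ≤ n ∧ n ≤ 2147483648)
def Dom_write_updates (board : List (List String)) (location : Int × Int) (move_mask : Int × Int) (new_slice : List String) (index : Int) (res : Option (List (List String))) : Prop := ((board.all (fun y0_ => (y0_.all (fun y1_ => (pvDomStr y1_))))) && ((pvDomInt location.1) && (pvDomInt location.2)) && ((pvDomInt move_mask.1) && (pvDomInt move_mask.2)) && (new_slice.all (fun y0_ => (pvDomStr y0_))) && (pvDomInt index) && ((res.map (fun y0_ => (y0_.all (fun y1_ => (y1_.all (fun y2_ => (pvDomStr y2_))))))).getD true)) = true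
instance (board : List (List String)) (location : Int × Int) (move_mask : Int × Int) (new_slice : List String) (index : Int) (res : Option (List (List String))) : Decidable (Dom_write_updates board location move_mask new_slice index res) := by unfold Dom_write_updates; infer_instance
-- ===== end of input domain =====

-- B rewrites A's recursion as a while loop over the slice that consistently propagates res on
-- every early stop (A's recursion drops res to the default past the first step: see D_ below).
-- Both Pythons mutate board and new_slice in place identically; the equivalence proved here is
-- about the RETURN value only.

-- shared transliteration of the Python assignment `board[r][c] = ch` (r, c ≥ 0 at every use)
def writeAt (board : List (List String)) (p : Int × Int) (ch : String) : List (List String) :=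
  board.set p.1.toNat ((board.getD p.1.toNat []).set p.2.toNat ch)

-- ===== PORT A =====
def tupleSum (a b : Int × Int) : Int × Int := (a.1 + b.1, a.2 + b.2)

def write_updates (board : List (List String)) (location : Int × Int) (move_mask : Int × Int) (new_slice : List String) (index : Int) (res : Option (List (List String))) : Option (List (List String)) :=
  let rows : Int := board.length
  let cols : Int := (board.headD []).length
  match new_slice with
  | [] => some board
  | new_char :: rest =>
    let next_loc := if index > 0 then tupleSum location move_mask else location
    -- Python's chained comparison `rows >= new_row < 0 or cols >= new_col < 0`
    if (rows ≥ next_loc.1 ∧ next_loc.1 < 0) ∨ (cols ≥ next_loc.2 ∧ next_loc.2 < 0) then res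
    else
      let board1 := writeAt board next_loc new_char
      if new_char = "#" then res
      else write_updates board1 next_loc move_mask rest (index + 1) none

-- ===== PORT B =====
-- the while loop of Source B: state = (board, row, col, index), consuming the slice
def wuLoop (board : List (List String)) (row col mr mc : Int) (slice : List String) (index : Int) (res : Option (List (List String))) : Option (List (List String)) :=
  match slice with
  | [] => some board
  | new_char :: rest =>
    let row := if index > 0 then row + mr else row
    let col := if index > 0 then col + mc else col
    if row < 0 ∨ col < 0 then res
    else
      let board := writeAt board (row, col) new_char
      if new_char = "#" then res
      else wuLoop board row col mr mc rest (index + 1) res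

def write_updates_alt (board : List (List String)) (location : Int × Int) (move_mask : Int × Int) (new_slice : List String) (index : Int) (res : Option (List (List String))) : Option (List (List String)) :=
  wuLoop board location.1 location.2 move_mask.1 move_mask.2 new_slice index res

-- ===== PRECONDITION & SPEC =====
-- the walk stops at step k: negative coordinate there (the position of the k-th written char is
-- start + max(0, min(k+1, k+index)) * mask), or the k-th char is a wall
def wuStop (location move_mask : Int × Int) (index : Int) (slice : List String) (k : Nat) : Prop :=
  let p := location + max 0 (min (k + 1 : Int) (k + index)) • move_mask
  p.1 < 0 ∨ p.2 < 0 ∨ slice.getD k "" = "#"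

def wuMoves (index : Int) (k : Nat) : Int := max 0 (min ((k : Int) + 1) ((k : Int) + index))

def wuPos (location move_mask : Int × Int) (index : Int) (k : Nat) : Int × Int :=
  (location.1 + wuMoves index k * move_mask.1, location.2 + wuMoves index k * move_mask.2)

-- Pre_ excludes exactly the inputs on which Python A raises IndexError: an empty board
-- (len(board[0])), or an executed write whose row/column index is not below the board's bounds.
def Pre_write_updates (board : List (List String)) (location : Int × Int) (move_mask : Int × Int) (new_slice : List String) (index : Int) (res : Option (List (List String))) : Prop :=
  board ≠ [] ∧ ∀ k < new_slice.length,
    (∀ j < k, ¬ wuStop location move_mask index new_slice j) →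
    (0 ≤ (wuPos location move_mask index k).1 ∧ 0 ≤ (wuPos location move_mask index k).2) →
    ((wuPos location move_mask index k).1.toNat < board.length ∧
     (wuPos location move_mask index k).2.toNat < (board.getD (wuPos location move_mask index k).1.toNat []).length)
instance (board : List (List String)) (location : Int × Int) (move_mask : Int × Int) (new_slice : List String) (index : Int) (res : Option (List (List String))) : Decidable (Pre_write_updates board location move_mask new_slice index res) := by unfold Pre_write_updates wuStop; infer_instance

def pvWitness_write_updates : List (List String) × (Int × Int) × (Int × Int) × List String × Int × Option (List (List String)) :=
  ([[".", "."], [".", "."]], (0, 0), (0, 1), ["O", "O"], 0, none)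

-- On inputs where res is not None and the walk first stops (wall or negative coordinate) at step
-- 1 or later, A returns None because its recursive call drops res back to the default, while B
-- returns the given res, the intended failure value (A itself returns res for a stop at step 0).
def D_write_updates (board : List (List String)) (location : Int × Int) (move_mask : Int × Int) (new_slice : List String) (index : Int) (res : Option (List (List String))) : Prop :=
  res ≠ none ∧ ¬ wuStop location move_mask index new_slice 0 ∧
    ∃ k < new_slice.length, wuStop location move_mask index new_slice k
instance (board : List (List String)) (location : Int × Int) (move_mask : Int × Int) (new_slice : List String) (index : Int) (res : Option (List (List String))) : Decidable (D_write_updates board location move_mask new_slice index res) := by unfold D_write_updates wuStop; infer_instance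

def Spec_write_updates (board : List (List String)) (location : Int × Int) (move_mask : Int × Int) (new_slice : List String) (index : Int) (res : Option (List (List String))) (out : Option (List (List String))) : Prop := ¬ D_write_updates board location move_mask new_slice index res → out = write_updates_alt board location move_mask new_slice index res
instance (board : List (List String)) (location : Int × Int) (move_mask : Int × Int) (new_slice : List String) (index : Int) (res : Option (List (List String))) (out : Option (List (List String))) : Decidable (Spec_write_updates board location move_mask new_slice index res out) := by unfold Spec_write_updates; infer_instance

def pvDiffWitness_write_updates : List (List String) × (Int × Int) × (Int × Int) × List String × Int × Option (List (List String)) :=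
  ([[".", "."]], (0, 0), (0, 1), ["O", "#"], 0, some [["X"]])

def pvDiffWitnessOut_write_updates : (Option (List (List String))) × (Option (List (List String))) :=
  (none, some [["X"]])

-- ===== CLAIM (what is proved, stated in full; the proofs are below) =====
def Claim_unchanged_write_updates : Prop := ∀ (board : List (List String)) (location : Int × Int) (move_mask : Int × Int) (new_slice : List String) (index : Int) (res : Option (List (List String))), Dom_write_updates board location move_mask new_slice index res → Pre_write_updates board location move_mask new_slice index res → Spec_write_updates board location move_mask new_slice index res (write_updates board location move_mask new_slice index res)
def Claim_changed_write_updates : Prop := Dom_write_updates (pvDiffWitness_write_updates.1) (pvDiffWitness_write_updates.2.1) (pvDiffWitness_write_updates.2.2.1) (pvDiffWitness_write_updates.2.2.2.1) (pvDiffWitness_write_updates.2.2.2.2.1) (pvDiffWitness_write_updates.2.2.2.2.2) ∧ Pre_write_updates (pvDiffWitness_write_updates.1) (pvDiffWitness_write_updates.2.1) (pvDiffWitness_write_updates.2.2.1) (pvDiffWitness_write_updates.2.2.2.1) (pvDiffWitness_write_updates.2.2.2.2.1) (pvDiffWitness_write_updates.2.2.2.2.2) ∧ D_write_updates (pvDiffWitness_write_updates.1)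 (pvDiffWitness_write_updates.2.1) (pvDiffWitness_write_updates.2.2.1) (pvDiffWitness_write_updates.2.2.2.1) (pvDiffWitness_write_updates.2.2.2.2.1) (pvDiffWitness_write_updates.2.2.2.2.2) ∧ write_updates (pvDiffWitness_write_updates.1) (pvDiffWitness_write_updates.2.1) (pvDiffWitness_write_updates.2.2.1) (pvDiffWitness_write_updates.2.2.2.1) (pvDiffWitness_write_updates.2.2.2.2.1) (pvDiffWitness_write_updates.2.2.2.2.2) = pvDiffWitnessOut_write_updates.1 ∧ write_updates_alt (pvDiffWitness_write_updates.1) (pvDiffWitness_write_updates.2.1) (pvDiffWitness_write_updates.2.2.1) (pvDiffWitness_write_updates.2.2.2.1) (pvDiffWitness_write_updates.2.2.2.2.1) (pvDiffWitness_write_updates.2.2.2.2.2) = pvDiffWitnessOut_write_updates.2 ∧ pvDiffWitnessOut_write_updates.1 ≠ pvDiffWitnessOut_write_updates.2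
def Claim_exact_write_updates : Prop := ∀ (board : List (List String)) (location : Int × Int) (move_mask : Int × Int) (new_slice : List String) (index : Int) (res : Option (List (List String))), Dom_write_updates board location move_mask new_slice index res → Pre_write_updates board location move_mask new_slice index res → D_write_updates board location move_mask new_slice index res → write_updates board location move_mask new_slice index res ≠ write_updates_alt board location move_mask new_slice index res

-- ===== LEMMAS AND PROOFS =====
lemma wuStop_iff (loc mask : Int × Int) (index : Int) (slice : List String) (k : Nat) :
    wuStop loc mask index slice k ↔
      ((wuPos loc mask index k).1 < 0 ∨ (wuPos loc mask index k).2 < 0 ∨ slice.getD k "" = "#") := by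
  unfold wuStop wuPos wuMoves
  simp [Prod.fst_add, Prod.snd_add, smul_eq_mul]

lemma exists_first (slice : List String) (loc mask : Int × Int) (index : Int) (k : Nat) :
    k < slice.length → wuStop loc mask index slice k →
    ∃ m, m < slice.length ∧ wuStop loc mask index slice m ∧
      ∀ j < m, ¬ wuStop loc mask index slice j := by
  induction k using Nat.strong_induction_on with
  | _ k ih =>
    intro hk hs
    by_cases h : ∃ j < k, wuStop loc mask index slice j
    · obtain ⟨j, hj, hsj⟩ := h
      exact ih j hj (Nat.lt_trans hj hk) hsj
    · push_neg at h
      exact ⟨k, hk, hs, h⟩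

lemma wuMoves_zero (index : Int) : wuMoves index 0 = if index > 0 then 1 else 0 := by
  unfold wuMoves; norm_num [max_def, min_def]; split_ifs <;> omega

lemma wuPos_zero (loc mask : Int × Int) (index : Int) :
    wuPos loc mask index 0 = if index > 0 then tupleSum loc mask else loc := by
  unfold wuPos tupleSum; rw [wuMoves_zero]; split_ifs <;> simp

lemma wuMoves_shift (index : Int) (k : Nat) :
    (if index > 0 then (1 : Int) else 0) + wuMoves (index + 1) k = wuMoves index (k + 1) := by
  unfold wuMoves
  push_cast
  rcases le_total ((k : Int) + 1) ((k : Int) + (index + 1)) with h | h <;>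
    rcases le_total (0 : Int) (min ((k : Int) + 1) ((k : Int) + index + 1)) with h2 | h2 <;>
    simp [max_def, min_def] <;> split_ifs <;> omega

lemma wuPos_shift (loc mask : Int × Int) (index : Int) (k : Nat) :
    wuPos (wuPos loc mask index 0) mask (index + 1) k = wuPos loc mask index (k + 1) := by
  have h := wuMoves_shift index k
  rw [wuPos_zero]
  unfold wuPos tupleSum
  split_ifs at h ⊢ with hi <;>
    simp only [Prod.mk.injEq] <;> constructor <;>
    first
      | linear_combination mask.1 * h
      | linear_combination mask.2 * h

lemma wuStop_shift (loc mask : Int × Int) (index : Int) (ch : String) (rest : List String) (k : Nat) :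
    wuStop (wuPos loc mask index 0) mask (index + 1) rest k
      ↔ wuStop loc mask index (ch :: rest) (k + 1) := by
  rw [wuStop_iff, wuStop_iff, wuPos_shift]
  simp

-- one step of the loop, phrased with the closed-form position of step 0
lemma wuLoop_cons (board : List (List String)) (loc mask : Int × Int) (index : Int)
    (ch : String) (rest : List String) (res : Option (List (List String))) :
    wuLoop board loc.1 loc.2 mask.1 mask.2 (ch :: rest) index res =
      if (wuPos loc mask index 0).1 < 0 ∨ (wuPos loc mask index 0).2 < 0 then res
      else if ch = "#" then res
      else wuLoop (writeAt board (wuPos loc mask index 0) ch)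
             (wuPos loc mask index 0).1 (wuPos loc mask index 0).2 mask.1 mask.2 rest (index + 1) res := by
  rw [wuPos_zero]
  simp only [wuLoop]
  by_cases hi : index > 0 <;> simp [hi, tupleSum]

-- one step of A, phrased the same way (Python's chained comparison `rows >= r < 0` is `r < 0`)
lemma write_updates_cons (board : List (List String)) (loc mask : Int × Int) (index : Int)
    (ch : String) (rest : List String) (res : Option (List (List String))) :
    write_updates board loc mask (ch :: rest) index res =
      if (wuPos loc mask index 0).1 < 0 ∨ (wuPos loc mask index 0).2 < 0 then res
      else if ch = "#" then res
      else write_updates (writeAt board (wuPos loc mask index 0) ch)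
             (wuPos loc mask index 0) mask rest (index + 1) none := by
  simp only [write_updates, wuPos_zero]
  have hg : (((board.length : Int) ≥ (if index > 0 then tupleSum loc mask else loc).1 ∧
        (if index > 0 then tupleSum loc mask else loc).1 < 0) ∨
      (((board.headD []).length : Int) ≥ (if index > 0 then tupleSum loc mask else loc).2 ∧
        (if index > 0 then tupleSum loc mask else loc).2 < 0)) ↔
      ((if index > 0 then tupleSum loc mask else loc).1 < 0 ∨
        (if index > 0 then tupleSum loc mask else loc).2 < 0) := by
    have := Int.natCast_nonneg board.length
    have := Int.natCast_nonneg (board.headD []).length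
    omega
  rw [if_congr hg rfl rfl]

-- A with res = none is step-for-step the loop with res = none
lemma A_eq_loop_none (slice : List String) :
    ∀ (board : List (List String)) (loc mask : Int × Int) (index : Int),
      write_updates board loc mask slice index none
        = wuLoop board loc.1 loc.2 mask.1 mask.2 slice index none := by
  induction slice with
  | nil => intro board loc mask index; simp [write_updates, wuLoop]
  | cons ch rest ih =>
    intro board loc mask index
    rw [write_updates_cons, wuLoop_cons, ih]

-- if the walk never stops, the loop's result does not depend on res
lemma loop_res_irrel (slice : List String) :
    ∀ (board : List (List String)) (loc mask : Int × Int) (index : Int)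
      (res1 res2 : Option (List (List String))),
      (∀ k < slice.length, ¬ wuStop loc mask index slice k) →
      wuLoop board loc.1 loc.2 mask.1 mask.2 slice index res1
        = wuLoop board loc.1 loc.2 mask.1 mask.2 slice index res2 := by
  induction slice with
  | nil => intro _ _ _ _ _ _ _; simp [wuLoop]
  | cons ch rest ih =>
    intro board loc mask index res1 res2 hns
    have h0 := hns 0 (by simp)
    rw [wuStop_iff] at h0
    push_neg at h0
    have hcond : ¬((wuPos loc mask index 0).1 < 0 ∨ (wuPos loc mask index 0).2 < 0) := by
      omega
    rw [wuLoop_cons, wuLoop_cons]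
    rw [if_neg hcond, if_neg hcond]
    have hch : ch ≠ "#" := by simpa using h0.2.2
    rw [if_neg hch, if_neg hch]
    refine ih _ _ mask (index + 1) res1 res2 ?_
    intro k hk
    rw [wuStop_shift loc mask index ch rest k]
    exact hns (k + 1) (by simpa using Nat.succ_lt_succ hk)

-- the loop returns res at the walk's first stop
lemma loop_stops (slice : List String) :
    ∀ (board : List (List String)) (loc mask : Int × Int) (index : Int)
      (res : Option (List (List String))) (k : Nat),
      k < slice.length → wuStop loc mask index slice k →
      (∀ j < k, ¬ wuStop loc mask index slice j) →
      wuLoop board loc.1 loc.2 mask.1 mask.2 slice index res = res := by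
  induction slice with
  | nil => intro _ _ _ _ _ k hk; simp at hk
  | cons ch rest ih =>
    intro board loc mask index res k hk hs hmin
    rw [wuLoop_cons]
    cases k with
    | zero =>
      rw [wuStop_iff] at hs
      rcases hs with h | h | h
      · rw [if_pos (Or.inl h)]
      · rw [if_pos (Or.inr h)]
      · simp only [List.getD_cons_zero] at h
        by_cases hn : (wuPos loc mask index 0).1 < 0 ∨ (wuPos loc mask index 0).2 < 0
        · rw [if_pos hn]
        · rw [if_neg hn, if_pos h]
    | succ k =>
      have h0 := hmin 0 (Nat.succ_pos k)
      rw [wuStop_iff] at h0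
      push_neg at h0
      have hcond : ¬((wuPos loc mask index 0).1 < 0 ∨ (wuPos loc mask index 0).2 < 0) := by
        omega
      rw [if_neg hcond]
      have hch : ch ≠ "#" := by simpa using h0.2.2
      rw [if_neg hch]
      refine ih _ _ mask (index + 1) res k (by simpa using Nat.lt_of_succ_lt_succ hk) ?_ ?_
      · rw [wuStop_shift loc mask index ch rest k]; exact hs
      · intro j hj
        rw [wuStop_shift loc mask index ch rest j]
        exact hmin (j + 1) (Nat.succ_lt_succ hj)

-- A returns none when the walk's first stop is at step k >= 1 (its recursion dropped res)
lemma A_stops_none (slice : List String) :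
    ∀ (board : List (List String)) (loc mask : Int × Int) (index : Int)
      (res : Option (List (List String))) (k : Nat),
      k < slice.length → 1 ≤ k → wuStop loc mask index slice k →
      (∀ j < k, ¬ wuStop loc mask index slice j) →
      write_updates board loc mask slice index res = none := by
  induction slice with
  | nil => intro _ _ _ _ _ k hk; simp at hk
  | cons ch rest ih =>
    intro board loc mask index res k hk hk1 hs hmin
    have h0 := hmin 0 hk1
    rw [wuStop_iff] at h0
    push_neg at h0
    have hcond : ¬((wuPos loc mask index 0).1 < 0 ∨ (wuPos loc mask index 0).2 < 0) := by
      omega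
    rw [write_updates_cons]
    rw [if_neg hcond]
    have hch : ch ≠ "#" := by simpa using h0.2.2
    rw [if_neg hch]
    cases k with
    | zero => omega
    | succ k =>
      cases k with
      | zero =>
        -- the next step stops: A's inner call returns its res = none
        have hs0 : wuStop (wuPos loc mask index 0) mask (index + 1) rest 0 := by
          rw [wuStop_shift loc mask index ch rest 0]; exact hs
        have hlen : 0 < rest.length := by simpa using Nat.lt_of_succ_lt_succ hk
        rw [A_eq_loop_none]
        exact loop_stops rest _ _ mask (index + 1) none 0 hlen hs0 (by intro j hj; omega)
      | succ k =>
        refine ih _ _ mask (index + 1) none (k + 1)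
          (by simpa using Nat.lt_of_succ_lt_succ hk) (Nat.le_add_left 1 k) ?_ ?_
        · rw [wuStop_shift loc mask index ch rest (k + 1)]; exact hs
        · intro j hj
          rw [wuStop_shift loc mask index ch rest j]
          exact hmin (j + 1) (Nat.succ_lt_succ hj)

-- ===== VERDICT (by name: the statements are the Claim_ definitions above) =====
theorem write_updates_spec : Claim_unchanged_write_updates := by
  intro board loc mask slice index res _ _
  unfold Spec_write_updates write_updates_alt
  intro hnD
  cases res with
  | none => exact A_eq_loop_none slice board loc mask index
  | some r =>
    cases slice with
    | nil => simp [write_updates, wuLoop]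
    | cons ch rest =>
      by_cases hs0 : wuStop loc mask index (ch :: rest) 0
      · -- stop at step 0: both return res
        rw [write_updates_cons]
        rw [wuLoop_cons]
        rw [wuStop_iff] at hs0
        simp only [List.getD_cons_zero] at hs0
        by_cases hn : (wuPos loc mask index 0).1 < 0 ∨ (wuPos loc mask index 0).2 < 0
        · rw [if_pos hn, if_pos hn]
        · rw [if_neg hn, if_neg hn]
          have hw : ch = "#" := by tauto
          rw [if_pos hw, if_pos hw]
      · -- no stop anywhere (else D_ would hold): both write everything
        unfold D_write_updates at hnD
        push_neg at hnD
        have hall : ∀ k < (ch :: rest).length, ¬ wuStop loc mask index (ch :: rest) k :=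
          hnD (by simp) hs0
        have h0 := hall 0 (by simp)
        rw [wuStop_iff] at h0
        push_neg at h0
        have hch : ch ≠ "#" := by simpa using h0.2.2
        have hcond : ¬((wuPos loc mask index 0).1 < 0 ∨ (wuPos loc mask index 0).2 < 0) := by
          omega
        rw [write_updates_cons, wuLoop_cons]
        rw [if_neg hcond, if_neg hcond, if_neg hch, if_neg hch]
        rw [A_eq_loop_none]
        refine loop_res_irrel rest _ (wuPos loc mask index 0) mask (index + 1) none (some r) ?_
        intro k hk
        rw [wuStop_shift loc mask index ch rest k]
        exact hall (k + 1) (by simpa using Nat.succ_lt_succ hk)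

theorem write_updates_changed : Claim_changed_write_updates := by
  unfold Claim_changed_write_updates; decide

theorem write_updates_tight : Claim_exact_write_updates := by
  intro board loc mask slice index res _ _ hD
  unfold D_write_updates at hD
  obtain ⟨hres, hns0, k, hk, hs⟩ := hD
  obtain ⟨m, hm, hsm, hmin⟩ := exists_first slice loc mask index k hk hs
  have hm1 : 1 ≤ m := by
    cases m with
    | zero => exact absurd hsm hns0
    | succ m => exact Nat.le_add_left 1 m
  rw [A_stops_none slice board loc mask index res m hm hm1 hsm hmin]
  unfold write_updates_alt
  rw [loop_stops slice board loc mask index res m hm hsm hmin]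
  intro h
  exact hres h.symm
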